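-- pv_equiv track=rewrite | github.com/pypi-data/pypi-mirror-12 | packages/pemjh/pemjh-0.0.1.zip/pemjh-0.0.1/src/pemjh/challenge134/__init__.py | f
-- ===== SOURCE A (Python) =====
-- def jumpSize(t, c, s):
--     if t == c:
--         return 0
--
--     # s will always be 1, 3, 7, or 9
--     if s == 1:
--         cycle = [1, 2, 3, 4, 5, 6, 7, 8, 9, 0]
--     elif s == 3:
--         cycle = [3, 6, 9, 2, 5, 8, 1, 4, 7, 0]
--     elif s == 7:
--         cycle = [7, 4, 1, 8, 5, 2, 9, 6, 3, 0]
--     else: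
--         cycle = [9, 8, 7, 6, 5, 4, 3, 2, 1, 0]
--
--     # Find c in cycle
--     cInd = cycle.index(c)
--
--     # Find t in cycle
--     tInd = cycle.index(t)
--
--     # Is t after c?
--     if t in cycle[cInd:]:
--         return tInd - cInd
--     else:
--         return 10 - cInd + tInd
--
-- def f(target, current, step):
--     # Get the last digit of step
--     s = step % 10
--     # Get the last digit of current
--     c = current % 10
--     # Get the last digit of target
--     t = target % 10
--
--     # Get the amount to jump step by to get to the target digit
--     jump = jumpSize(t, c, s) * step
--     current += jump
--
--     # If target >= 10, recur
--     if target >= 10: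
--         return f(target // 10, current // 10, step) * 10 + t
--     else:
--         return current
-- ===== SOURCE B (Python) =====
-- def f(target, current, step):
--     # Iterative accumulator loop with a closed-form jump (inverse of step's last digit mod 10)
--     inv = {1: 1, 3: 7, 7: 3}.get(step % 10, 9)
--     result = 0
--     p = 1
--     while True:
--         t = target % 10
--         current += (t - current) * inv % 10 * step
--         if target < 10:
--             return result + current * p
--         result += t * p
--         p *= 10
--         target //= 10
--         current //= 10
-- ===== Notes on version B (the rewrite author's own statement) =====
-- stated objective: alternative
-- what changed: Replaces A's recursion (rebuilding the result from the recursive call) with a single iterative loop carrying a result accumulator and place multiplier, and replaces A's cycle-list search in jumpSize with a closed-form modular-inverse jump (t-c)*inv(step%10) % 10.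
import Mathlib
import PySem

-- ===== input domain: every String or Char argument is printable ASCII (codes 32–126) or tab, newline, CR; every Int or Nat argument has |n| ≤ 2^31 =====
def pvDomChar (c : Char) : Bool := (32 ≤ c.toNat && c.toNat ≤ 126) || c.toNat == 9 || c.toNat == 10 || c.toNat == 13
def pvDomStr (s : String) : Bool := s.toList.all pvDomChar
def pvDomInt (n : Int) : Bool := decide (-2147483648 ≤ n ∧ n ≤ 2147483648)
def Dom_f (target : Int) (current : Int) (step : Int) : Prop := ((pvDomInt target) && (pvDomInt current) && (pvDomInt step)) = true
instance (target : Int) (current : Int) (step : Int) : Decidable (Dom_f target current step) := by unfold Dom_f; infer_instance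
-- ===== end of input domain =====

-- B replaces A's recursion by an accumulator loop and A's cycle-list search by a closed-form modular-inverse jump (alternative decomposition; same cost).

-- ===== PORT A =====
-- cycle.index(c) can in principle raise ValueError in Python, but every cycle
-- contains all ten digits and c,t are digits, so the `.getD 0` default is unreachable.
def jumpSize (t : Int) (c : Int) (s : Int) : Int :=
  if t = c then 0
  else
    let cycle : List Int :=
      if s = 1 then [1, 2, 3, 4, 5, 6, 7, 8, 9, 0]
      else if s = 3 then [3, 6, 9, 2, 5, 8, 1, 4, 7, 0]
      else if s = 7 then [7, 4, 1, 8, 5, 2, 9, 6, 3, 0]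
      else [9, 8, 7, 6, 5, 4, 3, 2, 1, 0]
    let cInd : Int := ((PySem.List.index? cycle c).getD 0 : Nat)
    let tInd : Int := ((PySem.List.index? cycle t).getD 0 : Nat)
    if t ∈ PySem.List.slice cycle (some cInd) none then tInd - cInd
    else 10 - cInd + tInd

def f (target : Int) (current : Int) (step : Int) : Int :=
  let s := PySem.Int.mod step 10
  let c := PySem.Int.mod current 10
  let t := PySem.Int.mod target 10
  let jump := jumpSize t c s * step
  let current' := current + jump
  if target ≥ 10 then
    f (PySem.Int.floordiv target 10) (PySem.Int.floordiv current' 10) step * 10 + t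
  else current'
termination_by target.toNat
decreasing_by
  rename_i h
  rw [PySem.Int.floordiv_eq_ediv_of_pos (by norm_num)]
  omega

-- ===== PORT B =====
def fAltLoop (target : Int) (current : Int) (step : Int) (inv : Int)
    (result : Int) (p : Int) : Int :=
  let t := PySem.Int.mod target 10
  let current' := current + PySem.Int.mod ((t - current) * inv) 10 * step
  if target < 10 then result + current' * p
  else fAltLoop (PySem.Int.floordiv target 10) (PySem.Int.floordiv current' 10) step inv
         (result + t * p) (p * 10)
termination_by target.toNat
decreasing_by
  rename_i h
  rw [PySem.Int.floordiv_eq_ediv_of_pos (by norm_num)]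
  omega

def f_alt (target : Int) (current : Int) (step : Int) : Int :=
  let inv := (PySem.Dict.ofList [((1 : Int), (1 : Int)), (3, 7), (7, 3)]).getD
      (PySem.Int.mod step 10) 9
  fAltLoop target current step inv 0 1

-- ===== PRECONDITION & SPEC =====
def Spec_f (target : Int) (current : Int) (step : Int) (out : Int) : Prop := out = f_alt target current step
instance (target : Int) (current : Int) (step : Int) (out : Int) : Decidable (Spec_f target current step out) := by unfold Spec_f; infer_instance

-- ===== CLAIM (what is proved, stated in full; the proofs are below) =====
def Claim_equal_f : Prop := ∀ (target : Int) (current : Int) (step : Int), Dom_f target current step → Spec_f target current step (f target current step)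

-- ===== LEMMAS AND PROOFS =====

-- the value Source B's dict lookup produces, as a case split on s
def invOf (s : Int) : Int := if s = 1 then 1 else if s = 3 then 7 else if s = 7 then 3 else 9

lemma dict_inv_eq (s : Int) :
    (PySem.Dict.ofList [((1 : Int), (1 : Int)), (3, 7), (7, 3)]).getD s 9 = invOf s := by
  by_cases h1 : s = 1
  · subst h1; decide
  by_cases h3 : s = 3
  · subst h3; decide
  by_cases h7 : s = 7
  · subst h7; decide
  have hmk : PySem.Dict.ofList [((1 : Int), (1 : Int)), (3, 7), (7, 3)]
      = PySem.Dict.mk [((1 : Int), (1 : Int)), (3, 7), (7, 3)] := by decide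
  rw [hmk, PySem.Dict.getD_eq_get?_getD, PySem.Dict.get?_mk_cons,
    PySem.Dict.get?_mk_cons, PySem.Dict.get?_mk_cons]
  simp [invOf, h1, h3, h7, Ne.symm h1, Ne.symm h3, Ne.symm h7, PySem.Dict.get?]

-- the closed-form jump equals A's cycle-search jump, for digit arguments
lemma jumpSize_closed (t c s : Int) (ht0 : 0 ≤ t) (ht : t < 10) (hc0 : 0 ≤ c) (hc : c < 10)
    (hs0 : 0 ≤ s) (hs : s < 10) :
    PySem.Int.mod ((t - c) * invOf s) 10 = jumpSize t c s := by
  interval_cases t <;> interval_cases c <;> interval_cases s <;> decide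

-- reducing current modulo 10 inside the jump does not change it
lemma mod_jump_reduce (t current inv : Int) :
    PySem.Int.mod ((t - current) * inv) 10
      = PySem.Int.mod ((t - PySem.Int.mod current 10) * inv) 10 := by
  rw [PySem.Int.mod_eq_emod_of_pos (by norm_num), PySem.Int.mod_eq_emod_of_pos (by norm_num),
    PySem.Int.mod_eq_emod_of_pos (by norm_num)]
  conv_lhs => rw [Int.mul_emod, Int.sub_emod]
  conv_rhs => rw [Int.mul_emod, Int.sub_emod, Int.emod_emod_of_dvd _ dvd_rfl]

lemma loop_eq (n : Nat) (target current step inv result p : Int)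
    (hn : target.toNat ≤ n) (hinv : inv = invOf (PySem.Int.mod step 10)) :
    fAltLoop target current step inv result p = f target current step * p + result := by
  induction n generalizing target current step inv result p with
  | zero =>
    rw [fAltLoop, f]
    have hlt : target < 10 := by omega
    simp only [if_pos hlt, if_neg (by omega : ¬ target ≥ 10)]
    rw [hinv, mod_jump_reduce, jumpSize_closed _ _ _
      (PySem.Int.mod_nonneg _ (by norm_num)) (PySem.Int.mod_lt _ (by norm_num))
      (PySem.Int.mod_nonneg _ (by norm_num)) (PySem.Int.mod_lt _ (by norm_num))
      (PySem.Int.mod_nonneg _ (by norm_num)) (PySem.Int.mod_lt _ (by norm_num))]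
    ring
  | succ n ih =>
    rw [fAltLoop, f]
    by_cases hlt : target < 10
    · simp only [if_pos hlt, if_neg (by omega : ¬ target ≥ 10)]
      rw [hinv, mod_jump_reduce, jumpSize_closed _ _ _
        (PySem.Int.mod_nonneg _ (by norm_num)) (PySem.Int.mod_lt _ (by norm_num))
        (PySem.Int.mod_nonneg _ (by norm_num)) (PySem.Int.mod_lt _ (by norm_num))
        (PySem.Int.mod_nonneg _ (by norm_num)) (PySem.Int.mod_lt _ (by norm_num))]
      ring
    · simp only [if_neg hlt, if_pos (by omega : target ≥ 10)]
      rw [hinv, mod_jump_reduce, jumpSize_closed _ _ _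
        (PySem.Int.mod_nonneg _ (by norm_num)) (PySem.Int.mod_lt _ (by norm_num))
        (PySem.Int.mod_nonneg _ (by norm_num)) (PySem.Int.mod_lt _ (by norm_num))
        (PySem.Int.mod_nonneg _ (by norm_num)) (PySem.Int.mod_lt _ (by norm_num))]
      rw [ih _ _ _ _ _ _ (by
        rw [PySem.Int.floordiv_eq_ediv_of_pos (by norm_num)]; omega) rfl]
      ring

-- ===== VERDICT (by name: the statement is the Claim_ definition above) =====
theorem f_spec : Claim_equal_f := by
  intro target current step _
  unfold Spec_f f_alt
  rw [dict_inv_eq,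
    loop_eq target.toNat target current step _ 0 1 le_rfl rfl]
  ring
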